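-- pv_equiv track=rewrite | github.com/coldshalamov/Telomere | swe.py | encode_swe_literal
-- ===== SOURCE A (Python) =====
-- def encode_swe_literal(x: int) -> str:
--     if x < 0:
--         raise ValueError("SWE undefined for negative x")
--     level = 0
--     total = 0
--     while True:
--         count = 1 << level
--         if x < total + count:
--             index = x - total
--             return '0' * level + format(index, f'0{level}b')
--         total += count
--         level += 1
-- ===== SOURCE B (Python) =====
-- def encode_swe_literal(x: int) -> str:
--     if x < 0:
--         raise ValueError("SWE undefined for negative x")
--     level = (x + 1).bit_length() - 1
--     index = x + 1 - (1 << level)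
--     return '0' * level + format(index, f'0{level}b')
-- ===== Notes on version B (the rewrite author's own statement) =====
-- stated objective: simpler
-- what changed: Replaces the while-loop that accumulates total and level with a closed-form computation: level = (x+1).bit_length()-1 and index = x+1 - (1<<level).
import Mathlib
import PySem

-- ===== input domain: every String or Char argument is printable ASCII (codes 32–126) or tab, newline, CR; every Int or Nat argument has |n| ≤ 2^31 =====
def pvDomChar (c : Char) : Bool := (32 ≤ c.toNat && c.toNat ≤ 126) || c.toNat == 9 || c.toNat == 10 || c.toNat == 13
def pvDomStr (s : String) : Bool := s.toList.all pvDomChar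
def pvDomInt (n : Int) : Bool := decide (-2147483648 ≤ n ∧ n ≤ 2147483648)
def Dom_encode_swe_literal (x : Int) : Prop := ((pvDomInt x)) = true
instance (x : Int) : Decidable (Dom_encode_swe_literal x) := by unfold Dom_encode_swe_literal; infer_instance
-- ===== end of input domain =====

-- B replaces A's while-loop (accumulating total and level) with the closed form
-- level = (x+1).bit_length()-1, index = x+1 - 2^level; objective: simpler.

-- ===== PORT A =====

-- binary digits of a natural number, most significant first ('' for 0)
def pvBinDigits : Nat → List Char
  | 0 => []
  | n+1 => pvBinDigits ((n+1) / 2) ++ [if (n+1) % 2 = 1 then '1' else '0']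

-- format(i, f'0{w}b') for i ≥ 0 (the only values either program passes): binary
-- representation of i, left-padded with '0' to width w; exact on that domain
def pvFormatBin (i : Int) (w : Nat) : String :=
  let ds := if i.toNat = 0 then ['0'] else pvBinDigits i.toNat
  String.mk (List.replicate (w - ds.length) '0' ++ ds)

-- the 'while True' loop of A, as a recursion on the same state (level, total)
def pvLoopA (x : Int) (level : Nat) (total : Int) : String :=
  let count : Int := 2 ^ level
  if x < total + count then
    String.mk (List.replicate level '0') ++ pvFormatBin (x - total) level
  else
    pvLoopA x (level + 1) (total + count)
termination_by (x - total).toNat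
decreasing_by
  have h1 : (0:Int) < 2 ^ level := pow_pos (by norm_num) level
  simp only [not_lt] at *
  omega

def encode_swe_literal (x : Int) : String :=
  if x < 0 then ""   -- Python raises ValueError here; excluded by Pre_
  else pvLoopA x 0 0

-- ===== PORT B =====
def encode_swe_literal_alt (x : Int) : String :=
  if x < 0 then ""   -- Python raises ValueError here; excluded by Pre_
  else
    let level : Nat := (x + 1).toNat.log2   -- (x+1).bit_length() - 1, since x+1 ≥ 1
    let index : Int := x + 1 - 2 ^ level
    String.mk (List.replicate level '0') ++ pvFormatBin index level

-- ===== PRECONDITION & SPEC =====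
-- A raises ValueError exactly when x < 0; Pre_ admits everything else.
def Pre_encode_swe_literal (x : Int) : Prop := 0 ≤ x
instance (x : Int) : Decidable (Pre_encode_swe_literal x) := by unfold Pre_encode_swe_literal; infer_instance
def pvWitness_encode_swe_literal : Int := (6)

def Spec_encode_swe_literal (x : Int) (out : String) : Prop := out = encode_swe_literal_alt x
instance (x : Int) (out : String) : Decidable (Spec_encode_swe_literal x out) := by unfold Spec_encode_swe_literal; infer_instance

-- ===== CLAIM (what is proved, stated in full; the proofs are below) =====
def Claim_equal_encode_swe_literal : Prop := ∀ (x : Int), Dom_encode_swe_literal x → Pre_encode_swe_literal x → Spec_encode_swe_literal x (encode_swe_literal x)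

-- ===== LEMMAS AND PROOFS =====

lemma pvLoop_spec (x : Int) (hx : 0 ≤ x) :
    ∀ (d level : Nat), (x + 1).toNat.log2 - level = d → (2:Int) ^ level ≤ x + 1 →
      pvLoopA x level (2 ^ level - 1) =
        String.mk (List.replicate ((x + 1).toNat.log2) '0') ++
          pvFormatBin (x + 1 - 2 ^ ((x + 1).toNat.log2)) ((x + 1).toNat.log2) := by
  intro d
  induction d with
  | zero =>
    intro level hd hle
    rw [pvLoopA]
    have hn : (x + 1).toNat ≠ 0 := by omega
    have hcast : ((2:Int) ^ level) = ((2 ^ level : Nat) : Int) := by push_cast; ring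
    by_cases hcase : x < (2 ^ level - 1) + 2 ^ level
    · -- terminal step: 2^level ≤ x+1 < 2^(level+1), so log2 (x+1) = level
      have hub : (x + 1).toNat < 2 ^ (level + 1) := by
        have : ((2:Int) ^ (level+1)) = ((2 ^ (level+1) : Nat) : Int) := by push_cast; ring
        omega
      have hlb : 2 ^ level ≤ (x + 1).toNat := by omega
      have hL : (x + 1).toNat.log2 = level := by
        have h1 : level ≤ (x + 1).toNat.log2 := (Nat.le_log2 hn).mpr hlb
        have h2 : (x + 1).toNat.log2 < level + 1 := (Nat.log2_lt hn).mpr hub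
        omega
      simp only [if_pos hcase, hL]
      congr 1
      · congr 1; omega
    · -- loop step: 2^(level+1) ≤ x+1, recurse
      exfalso
      have hle' : (2:Int) ^ (level + 1) ≤ x + 1 := by
        have : (2:Int) ^ (level+1) = 2 ^ level + 2 ^ level := by ring
        omega
      have : level + 1 ≤ (x + 1).toNat.log2 := by
        apply (Nat.le_log2 (by omega)).mpr
        have : ((2:Int) ^ (level+1)) = ((2 ^ (level+1) : Nat) : Int) := by push_cast; ring
        omega
      omega
  | succ d ih =>
    intro level hd hle
    rw [pvLoopA]
    by_cases hcase : x < (2 ^ level - 1) + 2 ^ level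
    · -- would be terminal, but then log2 = level contradicting hd
      exfalso
      have hn : (x + 1).toNat ≠ 0 := by omega
      have hub : (x + 1).toNat < 2 ^ (level + 1) := by
        have : ((2:Int) ^ (level+1)) = ((2 ^ (level+1) : Nat) : Int) := by push_cast; ring
        have h2 : (2:Int) ^ (level+1) = 2 ^ level + 2 ^ level := by ring
        omega
      have := (Nat.log2_lt hn).mpr hub
      omega
    · simp only [if_neg hcase]
      have hle' : (2:Int) ^ (level + 1) ≤ x + 1 := by
        have : (2:Int) ^ (level+1) = 2 ^ level + 2 ^ level := by ring
        omega
      have hstep : (2:Int) ^ level - 1 + 2 ^ level = 2 ^ (level + 1) - 1 := by ring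
      rw [hstep]
      apply ih (level + 1) _ hle'
      have hn : (x + 1).toNat ≠ 0 := by omega
      have : level + 1 ≤ (x + 1).toNat.log2 := by
        apply (Nat.le_log2 hn).mpr
        have : ((2:Int) ^ (level+1)) = ((2 ^ (level+1) : Nat) : Int) := by push_cast; ring
        omega
      omega

-- ===== VERDICT (by name: the statement is the Claim_ definition above) =====
theorem encode_swe_literal_spec : Claim_equal_encode_swe_literal := by
  intro x _ hpre
  unfold Pre_encode_swe_literal at hpre
  unfold Spec_encode_swe_literal encode_swe_literal encode_swe_literal_alt
  rw [if_neg (by omega), if_neg (by omega)]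
  have h0 : (0:Int) = 2 ^ (0:Nat) - 1 := by norm_num
  rw [h0]
  exact pvLoop_spec x hpre _ 0 rfl (by norm_num; omega)
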